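-- pv_equiv track=rewrite | github.com/Alexbokoff/roulette | test_bot.py | dozen
-- ===== SOURCE A (Python) =====
-- def dozen(summ_list):
--     first_12 = [1, 2, 3, 4, 5, 6, 7, 8, 9, 10, 11, 12]
--     second_12 = [13, 14, 15, 16, 17, 18, 19, 20, 21, 22, 23, 24]
--     third_12 = [25, 26, 27, 28, 29, 30, 31, 32, 33, 34, 35, 36]
--
--     list_first_12 = [0, 0]
--     list_second_12 = [0, 0]
--     list_third_12 = [0, 0]
--
--     for i_number in range(len(summ_list)):
--         for index1 in first_12:
--             if index1 == summ_list[i_number][0]: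
--                 list_first_12[0] += 1
--                 list_first_12[1] += summ_list[i_number][1]
--                 break
--         for index2 in second_12:
--             if index2 == summ_list[i_number][0]:
--                 list_second_12[0] += 1
--                 list_second_12[1] += summ_list[i_number][1]
--                 break
--         for index3 in third_12:
--             if index3 == summ_list[i_number][0]:
--                 list_third_12[0] += 1
--                 list_third_12[1] += summ_list[i_number][1]
--                 break
--     return list_first_12, list_second_12, list_third_12
-- ===== SOURCE B (Python) =====
-- def dozen(summ_list):
--     table = {}
--     for n in range(1, 37):
--         table[n] = (n - 1) // 12
--     acc = [[0, 0], [0, 0], [0, 0]]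
--     for bet in summ_list:
--         d = table.get(bet[0])
--         if d is not None:
--             acc[d][0] += 1
--             acc[d][1] += bet[1]
--     return acc[0], acc[1], acc[2]
-- ===== Notes on version B (the rewrite author's own statement) =====
-- stated objective: simpler
-- what changed: Replaces the three separate linear scans (with break) over the dozen lists per bet by a precomputed number->dozen dict and a single pass with three [count,sum] accumulators.
import Mathlib
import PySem

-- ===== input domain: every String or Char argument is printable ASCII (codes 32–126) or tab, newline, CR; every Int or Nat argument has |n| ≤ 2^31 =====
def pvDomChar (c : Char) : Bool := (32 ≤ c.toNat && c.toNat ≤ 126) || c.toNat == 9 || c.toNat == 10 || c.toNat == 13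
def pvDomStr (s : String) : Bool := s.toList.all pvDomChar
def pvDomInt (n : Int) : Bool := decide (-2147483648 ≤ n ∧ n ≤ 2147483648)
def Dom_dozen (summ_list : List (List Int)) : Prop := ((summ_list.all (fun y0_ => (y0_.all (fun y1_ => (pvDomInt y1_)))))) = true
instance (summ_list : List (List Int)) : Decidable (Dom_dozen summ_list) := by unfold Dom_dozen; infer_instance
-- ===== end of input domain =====

-- B replaces A's three per-bet linear scans of the dozen lists by a precomputed number->dozen dict
-- and one pass with three (count, sum) accumulators (simpler; same return value).
-- ===== PORT A =====
-- 'for index in <dozen list>: if index == x: <update>; break' — first-match scan with break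
def pvScan (cands : List Int) (x amt : Int) (acc : Int × Int) : Int × Int :=
  match cands with
  | [] => acc
  | c :: rest => if c == x then (acc.1 + 1, acc.2 + amt) else pvScan rest x amt acc

-- one iteration of A's outer loop; bet[0]/bet[1] succeed under Pre_dozen (getD 0 is never the value used there)
def pvStepA (st : (Int × Int) × (Int × Int) × (Int × Int)) (bet : List Int) :
    (Int × Int) × (Int × Int) × (Int × Int) :=
  let x := (PySem.List.pyGet? bet 0).getD 0
  let amt := (PySem.List.pyGet? bet 1).getD 0
  (pvScan [1,2,3,4,5,6,7,8,9,10,11,12] x amt st.1,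
   pvScan [13,14,15,16,17,18,19,20,21,22,23,24] x amt st.2.1,
   pvScan [25,26,27,28,29,30,31,32,33,34,35,36] x amt st.2.2)

def dozen (summ_list : List (List Int)) : List Int × List Int × List Int :=
  let st := summ_list.foldl pvStepA ((0,0),(0,0),(0,0))
  ([st.1.1, st.1.2], [st.2.1.1, st.2.1.2], [st.2.2.1, st.2.2.2])

-- ===== PORT B =====
-- table = {}; for n in range(1, 37): table[n] = (n - 1) // 12
def pvDozenTable : PySem.Dict Int Int :=
  (PySem.List.pyRange 1 37 1).foldl
    (fun d n => d.insert n (PySem.Int.floordiv (n - 1) 12)) PySem.Dict.empty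

-- one iteration of B's loop: d = table.get(bet[0]); if d is not None: acc[d] updates
def pvStepB (acc : (Int × Int) × (Int × Int) × (Int × Int)) (bet : List Int) :
    (Int × Int) × (Int × Int) × (Int × Int) :=
  match PySem.Dict.get? pvDozenTable ((PySem.List.pyGet? bet 0).getD 0) with
  | none => acc
  | some d =>
    let amt := (PySem.List.pyGet? bet 1).getD 0
    if d == 0 then ((acc.1.1 + 1, acc.1.2 + amt), acc.2)
    else if d == 1 then (acc.1, (acc.2.1.1 + 1, acc.2.1.2 + amt), acc.2.2)
    else (acc.1, acc.2.1, (acc.2.2.1 + 1, acc.2.2.2 + amt))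

def dozen_alt (summ_list : List (List Int)) : List Int × List Int × List Int :=
  let st := summ_list.foldl pvStepB ((0,0),(0,0),(0,0))
  ([st.1.1, st.1.2], [st.2.1.1, st.2.1.2], [st.2.2.1, st.2.2.2])

-- ===== PRECONDITION & SPEC =====
-- Pre_ excludes exactly the inputs on which Python A raises IndexError: a bet list that is empty
-- (bet[0] raises) or whose first entry is a number 1..36 but which has no second entry (bet[1] raises).
def Pre_dozen (summ_list : List (List Int)) : Prop :=
  ∀ bet ∈ summ_list, bet ≠ [] ∧ (1 ≤ bet.headD 0 ∧ bet.headD 0 ≤ 36 → 2 ≤ bet.length)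
instance (summ_list : List (List Int)) : Decidable (Pre_dozen summ_list) := by unfold Pre_dozen; infer_instance
def pvWitness_dozen : List (List Int) := [[1, 5], [13, 7], [36, 2], [0, 9], [50]]

def Spec_dozen (summ_list : List (List Int)) (out : List Int × List Int × List Int) : Prop := out = dozen_alt summ_list
instance (summ_list : List (List Int)) (out : List Int × List Int × List Int) : Decidable (Spec_dozen summ_list out) := by unfold Spec_dozen; infer_instance

-- ===== CLAIM (what is proved, stated in full; the proofs are below) =====
def Claim_equal_dozen : Prop := ∀ (summ_list : List (List Int)), Dom_dozen summ_list → Pre_dozen summ_list → Spec_dozen summ_list (dozen summ_list)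

-- ===== LEMMAS AND PROOFS =====

theorem pvScan_mem (cands : List Int) (x amt : Int) (acc : Int × Int) :
    pvScan cands x amt acc = if x ∈ cands then (acc.1 + 1, acc.2 + amt) else acc := by
  induction cands with
  | nil => simp [pvScan]
  | cons c rest ih =>
    by_cases h : c = x
    · simp [pvScan, h, List.mem_cons]
    · have h' : ¬ (x = c) := fun e => h e.symm
      simp [pvScan, h, List.mem_cons, ih, h']

theorem pvMem_first (x : Int) :
    x ∈ ([1,2,3,4,5,6,7,8,9,10,11,12] : List Int) ↔ (1 ≤ x ∧ x ≤ 12) := by simp; omega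

theorem pvMem_second (x : Int) :
    x ∈ ([13,14,15,16,17,18,19,20,21,22,23,24] : List Int) ↔ (13 ≤ x ∧ x ≤ 24) := by simp; omega

theorem pvMem_third (x : Int) :
    x ∈ ([25,26,27,28,29,30,31,32,33,34,35,36] : List Int) ↔ (25 ≤ x ∧ x ≤ 36) := by simp; omega

set_option maxHeartbeats 1000000 in
theorem pvDozenTable_get (x : Int) :
    PySem.Dict.get? pvDozenTable x =
      if 1 ≤ x ∧ x ≤ 12 then some 0
      else if 13 ≤ x ∧ x ≤ 24 then some 1
      else if 25 ≤ x ∧ x ≤ 36 then some 2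
      else none := by
  by_cases hr : 1 ≤ x ∧ x ≤ 36
  · obtain ⟨h1, h2⟩ := hr
    interval_cases x <;> decide
  · have hkeys : PySem.Dict.keys pvDozenTable =
        [1,2,3,4,5,6,7,8,9,10,11,12,13,14,15,16,17,18,19,20,21,22,23,24,
         25,26,27,28,29,30,31,32,33,34,35,36] := by decide
    have hk : x ∉ PySem.Dict.keys pvDozenTable := by
      rw [hkeys]; simp; omega
    rw [(PySem.Dict.get?_eq_none_iff_not_mem_keys _ _).mpr hk]
    rw [if_neg (by omega), if_neg (by omega), if_neg (by omega)]

-- the two per-bet loop bodies agree on every state and bet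
theorem pvStep_eq (st : (Int × Int) × (Int × Int) × (Int × Int)) (bet : List Int) :
    pvStepA st bet = pvStepB st bet := by
  unfold pvStepA pvStepB
  dsimp only
  rw [pvDozenTable_get]
  rw [pvScan_mem, pvScan_mem, pvScan_mem]
  simp only [pvMem_first, pvMem_second, pvMem_third]
  set x := (PySem.List.pyGet? bet 0).getD 0
  by_cases h1 : 1 ≤ x ∧ x ≤ 12
  · rw [if_pos h1, if_pos h1, if_neg (by omega), if_neg (by omega)]; rfl
  · by_cases h2 : 13 ≤ x ∧ x ≤ 24
    · rw [if_neg h1, if_neg h1, if_pos h2, if_pos h2, if_neg (by omega)]; rfl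
    · by_cases h3 : 25 ≤ x ∧ x ≤ 36
      · rw [if_neg h1, if_neg h1, if_neg h2, if_neg h2, if_pos h3, if_pos h3]; rfl
      · rw [if_neg h1, if_neg h1, if_neg h2, if_neg h2, if_neg h3, if_neg h3]

theorem pvFold_eq (l : List (List Int)) (st : (Int × Int) × (Int × Int) × (Int × Int)) :
    l.foldl pvStepA st = l.foldl pvStepB st := by
  induction l generalizing st with
  | nil => rfl
  | cons b rest ih => simp only [List.foldl_cons, pvStep_eq]; exact ih _

-- ===== VERDICT (by name: the statement is the Claim_ definition above) =====
theorem dozen_spec : Claim_equal_dozen := by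
  intro summ_list _ _
  unfold Spec_dozen dozen dozen_alt
  rw [pvFold_eq]
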